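-- pv_equiv track=rewrite | github.com/j-217/python | codewars/74_sum_by_factors.py | sum_for_list
-- ===== SOURCE A (Python) =====
-- from functools import reduce
--
-- def sum_for_list(lst):
--     d, f_lst = {}, []
--     for num in set(lst):
--         d[num] = p_factors(num)
--     total_factors = sorted(reduce(lambda x, y: x.union(y), d.values()))
--     for p in total_factors:
--         sum_of_nums = 0
--         for num in lst:
--             if num % p == 0:
--                 sum_of_nums += num
--         f_lst.append([p, sum_of_nums])
--     return f_lst
--
-- def p_factors(num):
--     num = abs(num)
--     lst = []
--     while num >= 2:
--         for p in range(2, num + 1):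
--             if num % p == 0:
--                 lst.append(p)
--                 num = num // p
--                 break
--     return set(lst)
-- ===== SOURCE B (Python) =====
-- def sum_for_list(lst):
--     d = {}
--     for num in lst:
--         n = abs(num)
--         p = 2
--         while p * p <= n:
--             if n % p == 0:
--                 d[p] = d.get(p, 0) + num
--                 while n % p == 0:
--                     n //= p
--             p += 1
--         if n >= 2:
--             d[n] = d.get(n, 0) + num
--     return [[p, d[p]] for p in sorted(d)]
-- ===== Notes on version B (the rewrite author's own statement) =====
-- stated objective: faster
-- what changed: B factors each list element once by sqrt-bounded trial division and accumulates per-prime sums in a single dict pass, instead of A's full-range smallest-divisor factorisation per distinct element followed by a separate scan of the whole list for every prime.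
import Mathlib
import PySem

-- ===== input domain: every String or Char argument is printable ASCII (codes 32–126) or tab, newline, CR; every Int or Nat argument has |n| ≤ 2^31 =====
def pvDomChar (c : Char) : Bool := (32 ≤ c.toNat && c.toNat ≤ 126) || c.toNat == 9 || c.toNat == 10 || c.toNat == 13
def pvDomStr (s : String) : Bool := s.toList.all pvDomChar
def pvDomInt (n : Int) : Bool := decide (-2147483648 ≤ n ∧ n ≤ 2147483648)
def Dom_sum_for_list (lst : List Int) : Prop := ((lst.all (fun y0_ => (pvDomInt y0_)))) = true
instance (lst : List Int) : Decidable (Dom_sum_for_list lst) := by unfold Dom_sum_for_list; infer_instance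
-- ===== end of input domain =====

-- B replaces A's per-element full-range factorisation plus per-prime rescans of the list by one
-- sqrt-bounded trial-division pass accumulating per-prime sums in a dict (objective: faster).

-- ===== PORT A =====
-- 'for p in range(2, num + 1): if num % p == 0: … break' — the first divisor p of n with 2 ≤ p
-- (the fuel argument only makes the recursion structural; n + 1 - p steps always suffice)
def pvFindDivF : Nat → Nat → Nat → Option Nat
  | 0, _, _ => none
  | f + 1, n, p => if p ≤ n then (if n % p = 0 then some p else pvFindDivF f n (p + 1)) else none

def pvFindDiv (n p : Nat) : Option Nat := pvFindDivF (n + 1 - p) n p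

-- the 'while num >= 2' loop of p_factors, appending found factors (fuel n makes it structural)
def pvFactorWhileF : Nat → Nat → List Int → List Int
  | 0, _, acc => acc
  | f + 1, n, acc =>
    if 2 ≤ n then
      match pvFindDiv n 2 with
      | some p => pvFactorWhileF f (n / p) (acc ++ [(p : Int)])
      | none => acc
    else acc

def pvFactorWhile (n : Nat) (acc : List Int) : List Int := pvFactorWhileF n n acc

def pvPFactors (num : Int) : PySem.Set Int :=
  PySem.Set.ofList (pvFactorWhile num.natAbs [])

def sum_for_list (lst : List Int) : List (List Int) :=
  let s : PySem.Set Int := PySem.Set.ofList lst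
  let d : PySem.Dict Int (PySem.Set Int) :=
    s.foldl (fun d num => d.insert num (pvPFactors num)) PySem.Dict.empty
  match d.values with
  | [] => []  -- Python: reduce over the empty d.values() raises TypeError; excluded by Pre_
  | v :: vs =>
    let total := PySem.List.sorted (vs.foldl (fun x y => PySem.Set.union x y) v) (fun x => x) false
    total.foldl (fun fl p =>
      fl ++ [[p, lst.foldl (fun acc num => if PySem.Int.mod num p = 0 then acc + num else acc) 0]]) []

-- ===== PORT B =====
-- 'while n % p == 0: n //= p' (the guard '2 ≤ p ∧ 0 < n' and fuel n only make the recursion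
-- structural and total; reachable states satisfy them)
def pvStripF : Nat → Nat → Nat → Nat
  | 0, n, _ => n
  | f + 1, n, p => if 2 ≤ p ∧ 0 < n ∧ n % p = 0 then pvStripF f (n / p) p else n

def pvStrip (n p : Nat) : Nat := pvStripF n n p

-- the 'while p * p <= n' trial-division loop of B, adding num to d[q] for each prime q found
-- (fuel n + 1 - p makes it structural; when fuel runs out, p > n, so the loop condition is false)
def pvFactorAddF : Nat → Nat → Nat → Int → PySem.Dict Int Int → PySem.Dict Int Int
  | 0, n, _, num, d => if 2 ≤ n then d.insert (n : Int) (d.getD (n : Int) 0 + num) else d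
  | f + 1, n, p, num, d =>
    if 2 ≤ p ∧ p * p ≤ n then
      if n % p = 0 then
        pvFactorAddF f (pvStrip n p) (p + 1) num (d.insert (p : Int) (d.getD (p : Int) 0 + num))
      else pvFactorAddF f n (p + 1) num d
    else if 2 ≤ n then d.insert (n : Int) (d.getD (n : Int) 0 + num) else d

def pvFactorAdd (n p : Nat) (num : Int) (d : PySem.Dict Int Int) : PySem.Dict Int Int :=
  pvFactorAddF (n + 1 - p) n p num d

def sum_for_list_alt (lst : List Int) : List (List Int) :=
  let d : PySem.Dict Int Int :=
    lst.foldl (fun d num => pvFactorAdd num.natAbs 2 num d) PySem.Dict.empty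
  -- 'd[p]' for p in sorted(d): p ranges over d's keys, so the lookup is exact (default unreachable)
  (PySem.List.sorted d.keys (fun x => x) false).map (fun p => [p, d.getD p 0])

-- ===== PRECONDITION & SPEC =====
-- Pre_ excludes only the empty list, on which A's reduce over an empty sequence raises TypeError.
def Pre_sum_for_list (lst : List Int) : Prop := lst ≠ []
instance (lst : List Int) : Decidable (Pre_sum_for_list lst) := by unfold Pre_sum_for_list; infer_instance
def pvWitness_sum_for_list : List Int := [12, 15]

def Spec_sum_for_list (lst : List Int) (out : List (List Int)) : Prop := out = sum_for_list_alt lst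
instance (lst : List Int) (out : List (List Int)) : Decidable (Spec_sum_for_list lst out) := by unfold Spec_sum_for_list; infer_instance

-- ===== CLAIM (what is proved, stated in full; the proofs are below) =====
def Claim_equal_sum_for_list : Prop := ∀ (lst : List Int), Dom_sum_for_list lst → Pre_sum_for_list lst → Spec_sum_for_list lst (sum_for_list lst)

-- ===== LEMMAS AND PROOFS =====

theorem lem_findDivF_aux (f : Nat) : ∀ (n p : Nat), n + 1 - p ≤ f →
    2 ≤ p → p ≤ n.minFac → n.minFac ≤ n → pvFindDivF f n p = some n.minFac := by
  induction f with
  | zero =>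
    intro n p hf h2 hple hfle
    exfalso; omega
  | succ f ih =>
    intro n p hf h2 hple hfle
    simp only [pvFindDivF]
    rw [if_pos (by omega : p ≤ n)]
    by_cases hmod : n % p = 0
    · have hdvd : p ∣ n := Nat.dvd_of_mod_eq_zero hmod
      have := Nat.minFac_le_of_dvd h2 hdvd
      have hpe : p = n.minFac := by omega
      rw [if_pos hmod, hpe]
    · have hne : p ≠ n.minFac := by
        intro he
        apply hmod
        rw [he]
        exact Nat.mod_eq_zero_of_dvd (Nat.minFac_dvd n)
      rw [if_neg hmod]
      exact ih n (p + 1) (by omega) (by omega) (by omega) hfle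

theorem lem_findDiv_eq_minFac (n : Nat) (hn : 2 ≤ n) : pvFindDiv n 2 = some n.minFac := by
  have h1 : 2 ≤ n.minFac := (Nat.minFac_prime (by omega)).two_le
  have h2 : n.minFac ≤ n := Nat.minFac_le (by omega)
  exact lem_findDivF_aux (n + 1 - 2) n 2 (le_refl _) (by omega) h1 h2

theorem lem_primeFactors_split (n : Nat) (hn : 2 ≤ n) (q : Nat) :
    q ∈ n.primeFactors ↔ q = n.minFac ∨ q ∈ (n / n.minFac).primeFactors := by
  have hdvd : n.minFac ∣ n := Nat.minFac_dvd n
  have hm : n.minFac * (n / n.minFac) = n := Nat.mul_div_cancel' hdvd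
  have hm0 : n / n.minFac ≠ 0 := by
    intro h0; rw [h0, Nat.mul_zero] at hm; omega
  constructor
  · rintro hq
    rw [Nat.mem_primeFactors] at hq
    obtain ⟨hqp, hqn, hn0⟩ := hq
    by_cases he : q = n.minFac
    · exact Or.inl he
    · right
      rw [Nat.mem_primeFactors]
      refine ⟨hqp, ?_, hm0⟩
      have hnd : ¬ q ∣ n.minFac := by
        intro hdq
        exact he ((Nat.prime_dvd_prime_iff_eq hqp (Nat.minFac_prime (by omega))).mp hdq)
      have : q ∣ n.minFac * (n / n.minFac) := by rw [hm]; exact hqn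
      exact (hqp.dvd_mul.mp this).resolve_left hnd
  · rintro (he | hq)
    · subst he
      exact Nat.mem_primeFactors.mpr ⟨Nat.minFac_prime (by omega), hdvd, by omega⟩
    · rw [Nat.mem_primeFactors] at hq ⊢
      exact ⟨hq.1, hq.2.1.trans (Dvd.intro_left _ hm), by omega⟩

theorem lem_mem_pvFactorWhileF (f : Nat) : ∀ (n : Nat) (acc : List Int) (x : Int), n ≤ f →
    (x ∈ pvFactorWhileF f n acc ↔ x ∈ acc ∨ ∃ q : Nat, x = (q : Int) ∧ q ∈ n.primeFactors) := by
  induction f with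
  | zero =>
    intro n acc x hf
    have hn : n = 0 := by omega
    subst hn
    simp [pvFactorWhileF]
  | succ f ihf =>
    intro n acc x hf
    by_cases h2 : 2 ≤ n
    · have hdivlt : n / n.minFac < n :=
        Nat.div_lt_self (by omega) (Nat.minFac_prime (by omega)).one_lt
      have step : pvFactorWhileF (f + 1) n acc
          = pvFactorWhileF f (n / n.minFac) (acc ++ [(n.minFac : Int)]) := by
        show (if 2 ≤ n then
            match pvFindDiv n 2 with
            | some p => pvFactorWhileF f (n / p) (acc ++ [(p : Int)])
            | none => acc
          else acc) = _
        rw [if_pos h2, lem_findDiv_eq_minFac n h2]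
      rw [step, ihf (n / n.minFac) _ x (by omega)]
      simp only [List.mem_append, List.mem_singleton]
      constructor
      · rintro ((hx | hx) | ⟨q, rfl, hq⟩)
        · exact Or.inl hx
        · exact Or.inr ⟨n.minFac, hx, (lem_primeFactors_split n h2 _).mpr (Or.inl rfl)⟩
        · exact Or.inr ⟨q, rfl, (lem_primeFactors_split n h2 q).mpr (Or.inr hq)⟩
      · rintro (hx | ⟨q, rfl, hq⟩)
        · exact Or.inl (Or.inl hx)
        · rcases (lem_primeFactors_split n h2 q).mp hq with he | hd
          · exact Or.inl (Or.inr (by rw [he]))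
          · exact Or.inr ⟨q, rfl, hd⟩
    · have hstop : pvFactorWhileF (f + 1) n acc = acc := by
        show (if 2 ≤ n then
            match pvFindDiv n 2 with
            | some p => pvFactorWhileF f (n / p) (acc ++ [(p : Int)])
            | none => acc
          else acc) = acc
        rw [if_neg h2]
      have hemp : n.primeFactors = ∅ := by
        interval_cases n <;> simp
      rw [hstop]
      simp [hemp]

theorem lem_mem_pvFactorWhile (n : Nat) (acc : List Int) (x : Int) :
    x ∈ pvFactorWhile n acc ↔ x ∈ acc ∨ ∃ q : Nat, x = (q : Int) ∧ q ∈ n.primeFactors :=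
  lem_mem_pvFactorWhileF n n acc x (le_refl n)

theorem lem_mem_foldl_union (vs : List (PySem.Set Int)) (v : PySem.Set Int) (x : Int) :
    x ∈ vs.foldl (fun a b => PySem.Set.union a b) v ↔ x ∈ v ∨ ∃ s ∈ vs, x ∈ s := by
  induction vs generalizing v with
  | nil => simp
  | cons w ws ih =>
    simp only [List.foldl_cons, ih, PySem.Set.mem_union, List.mem_cons]
    constructor
    · rintro ((h | h) | ⟨s, hs, hx⟩)
      · exact Or.inl h
      · exact Or.inr ⟨w, Or.inl rfl, h⟩
      · exact Or.inr ⟨s, Or.inr hs, hx⟩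
    · rintro (h | ⟨s, (rfl | hs), hx⟩)
      · exact Or.inl (Or.inl h)
      · exact Or.inl (Or.inr hx)
      · exact Or.inr ⟨s, hs, hx⟩

theorem lem_nodup_foldl_union (vs : List (PySem.Set Int)) (v : PySem.Set Int) (hv : v.Nodup) :
    (vs.foldl (fun a b => PySem.Set.union a b) v).Nodup := by
  induction vs generalizing v with
  | nil => exact hv
  | cons w ws ih =>
    apply ih
    exact PySem.Set.nodup_union _ _ hv

theorem pvStripF_le (f : Nat) : ∀ n p : Nat, pvStripF f n p ≤ n := by
  induction f with
  | zero => intro n p; exact le_refl n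
  | succ f ih =>
    intro n p
    simp only [pvStripF]
    split
    · exact (ih (n / p) p).trans (Nat.div_le_self n p)
    · exact le_refl n

theorem pvStripF_pos (f : Nat) : ∀ n p : Nat, 0 < n → 0 < pvStripF f n p := by
  induction f with
  | zero => intro n p hn; exact hn
  | succ f ih =>
    intro n p hn
    simp only [pvStripF]
    split
    · rename_i h
      exact ih (n / p) p (Nat.div_pos (Nat.le_of_dvd h.2.1 (Nat.dvd_of_mod_eq_zero h.2.2)) (by omega))
    · exact hn

theorem pvStripF_dvd (f : Nat) : ∀ n p : Nat, pvStripF f n p ∣ n := by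
  induction f with
  | zero => intro n p; exact dvd_rfl
  | succ f ih =>
    intro n p
    simp only [pvStripF]
    split
    · rename_i h
      exact (ih (n / p) p).trans (Nat.div_dvd_of_dvd (Nat.dvd_of_mod_eq_zero h.2.2))
    · exact dvd_rfl

theorem pvStripF_not_dvd (f : Nat) : ∀ n p : Nat, n ≤ f → 2 ≤ p → 0 < n → ¬ p ∣ pvStripF f n p := by
  induction f with
  | zero => intro n p hf hp hn; omega
  | succ f ih =>
    intro n p hf hp hn
    simp only [pvStripF]
    split
    · rename_i h
      have hpos : 0 < n / p := Nat.div_pos (Nat.le_of_dvd h.2.1 (Nat.dvd_of_mod_eq_zero h.2.2)) (by omega)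
      have hlt : n / p < n := Nat.div_lt_self hn (by omega)
      exact ih (n / p) p (by omega) hp hpos
    · rename_i h
      intro hd
      exact h ⟨hp, hn, Nat.mod_eq_zero_of_dvd hd⟩

theorem pvStripF_prime_dvd_iff (f : Nat) : ∀ n p q : Nat, q.Prime → p.Prime → q ≠ p →
    0 < n → (q ∣ pvStripF f n p ↔ q ∣ n) := by
  induction f with
  | zero => intro n p q _ _ _ _; exact Iff.rfl
  | succ f ih =>
    intro n p q hq hp hne hn
    simp only [pvStripF]
    split
    · rename_i h
      have hpd : p ∣ n := Nat.dvd_of_mod_eq_zero h.2.2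
      have hpos : 0 < n / p := Nat.div_pos (Nat.le_of_dvd h.2.1 hpd) (by omega)
      rw [ih (n / p) p q hq hp hne hpos]
      constructor
      · exact fun hd => hd.trans (Nat.div_dvd_of_dvd hpd)
      · intro hd
        have hqp : ¬ q ∣ p := fun hdp => hne ((Nat.prime_dvd_prime_iff_eq hq hp).mp hdp)
        have : q ∣ p * (n / p) := by rw [Nat.mul_div_cancel' hpd]; exact hd
        exact (hq.dvd_mul.mp this).resolve_left hqp
    · exact Iff.rfl

theorem pvStrip_pos (n p : Nat) (hn : 0 < n) : 0 < pvStrip n p := pvStripF_pos n n p hn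

theorem pvStrip_dvd (n p : Nat) : pvStrip n p ∣ n := pvStripF_dvd n n p

theorem pvStrip_not_dvd (n p : Nat) (hp : 2 ≤ p) (hn : 0 < n) : ¬ p ∣ pvStrip n p :=
  pvStripF_not_dvd n n p (le_refl n) hp hn

theorem pvStrip_prime_dvd_iff (n p q : Nat) (hq : q.Prime) (hp : p.Prime) (hne : q ≠ p)
    (hn : 0 < n) : q ∣ pvStrip n p ↔ q ∣ n := pvStripF_prime_dvd_iff n n p q hq hp hne hn

theorem lem_prime_of_no_small (n p : Nat) (hp : 2 ≤ p) (hdvd : p ∣ n)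
    (inv : ∀ q, 2 ≤ q → q < p → ¬ q ∣ n) : p.Prime := by
  refine Nat.prime_def_minFac.mpr ⟨hp, ?_⟩
  by_contra hne
  have h1 : p.minFac ∣ p := Nat.minFac_dvd p
  have h2 : 2 ≤ p.minFac := (Nat.minFac_prime (by omega)).two_le
  have h3 : p.minFac ≤ p := Nat.le_of_dvd (by omega) h1
  exact inv p.minFac h2 (by omega) (h1.trans hdvd)

theorem lem_prime_terminal (n p : Nat) (hn : 2 ≤ n) (hlt : n < p * p)
    (inv : ∀ q, 2 ≤ q → q < p → ¬ q ∣ n) : n.Prime := by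
  by_contra np
  have h1 : n.minFac ^ 2 ≤ n := Nat.minFac_sq_le_self (by omega) np
  have h2 : 2 ≤ n.minFac := (Nat.minFac_prime (by omega)).two_le
  have hlt2 : n.minFac < p := by
    by_contra hge
    have : p * p ≤ n.minFac * n.minFac := Nat.mul_le_mul (by omega) (by omega)
    have : n.minFac ^ 2 = n.minFac * n.minFac := sq n.minFac
    omega
  exact inv n.minFac h2 hlt2 (Nat.minFac_dvd n)

theorem lem_primeFactors_strip (n p : Nat) (hp : p.Prime) (hdvd : p ∣ n) (hn : 0 < n)
    (q : Nat) : q ∈ n.primeFactors ↔ q = p ∨ q ∈ (pvStrip n p).primeFactors := by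
  constructor
  · intro hq
    rw [Nat.mem_primeFactors] at hq
    by_cases he : q = p
    · exact Or.inl he
    · right
      rw [Nat.mem_primeFactors]
      refine ⟨hq.1, (pvStrip_prime_dvd_iff n p q hq.1 hp he hn).mpr hq.2.1, ?_⟩
      have := pvStrip_pos n p hn
      omega
  · rintro (rfl | hq)
    · exact Nat.mem_primeFactors.mpr ⟨hp, hdvd, by omega⟩
    · rw [Nat.mem_primeFactors] at hq ⊢
      exact ⟨hq.1, hq.2.1.trans (pvStrip_dvd n p), by omega⟩

theorem lem_terminal_getD (n p : Nat) (num : Int) (d : PySem.Dict Int Int)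
    (hlt : n < p * p) (inv : ∀ q, 2 ≤ q → q < p → ¬ q ∣ n) (x : Int) :
    (if 2 ≤ n then d.insert (n : Int) (d.getD (n : Int) 0 + num) else d).getD x 0 =
      d.getD x 0 + (if 0 ≤ x ∧ x.toNat ∈ n.primeFactors then num else 0) := by
  by_cases h2 : 2 ≤ n
  · rw [if_pos h2]
    have hnp : n.Prime := lem_prime_terminal n p h2 hlt inv
    rw [PySem.Dict.getD_insert d (n : Int) x _ 0]
    by_cases hx : x = (n : Int)
    · subst hx
      have hm : ((n : Int)).toNat ∈ n.primeFactors := by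
        rw [Int.toNat_natCast, Nat.Prime.primeFactors hnp]
        exact Finset.mem_singleton_self n
      rw [if_pos rfl, if_pos ⟨Int.natCast_nonneg n, hm⟩]
    · rw [if_neg hx]
      have hc : ¬ (0 ≤ x ∧ x.toNat ∈ n.primeFactors) := by
        rintro ⟨h0, hm⟩
        rw [Nat.Prime.primeFactors hnp, Finset.mem_singleton] at hm
        exact hx (by rw [← hm, Int.toNat_of_nonneg h0])
      rw [if_neg hc, add_zero]
  · rw [if_neg h2]
    have hc : ¬ (0 ≤ x ∧ x.toNat ∈ n.primeFactors) := by
      rintro ⟨-, hm⟩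
      rw [Nat.mem_primeFactors] at hm
      have := hm.1.two_le
      have := Nat.le_of_dvd (by omega) hm.2.1
      omega
    rw [if_neg hc, add_zero]

theorem lem_terminal_keys (n p : Nat) (num : Int) (d : PySem.Dict Int Int)
    (hlt : n < p * p) (inv : ∀ q, 2 ≤ q → q < p → ¬ q ∣ n) (x : Int) :
    (x ∈ (if 2 ≤ n then d.insert (n : Int) (d.getD (n : Int) 0 + num) else d).keys ↔
      x ∈ d.keys ∨ (0 ≤ x ∧ x.toNat ∈ n.primeFactors)) := by
  by_cases h2 : 2 ≤ n
  · rw [if_pos h2]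
    have hnp : n.Prime := lem_prime_terminal n p h2 hlt inv
    rw [PySem.Dict.mem_keys_insert]
    constructor
    · rintro (rfl | hk)
      · refine Or.inr ⟨Int.natCast_nonneg n, ?_⟩
        rw [Int.toNat_natCast, Nat.Prime.primeFactors hnp]
        exact Finset.mem_singleton_self n
      · exact Or.inl hk
    · rintro (hk | ⟨h0, hm⟩)
      · exact Or.inr hk
      · rw [Nat.Prime.primeFactors hnp, Finset.mem_singleton] at hm
        exact Or.inl (by rw [← hm, Int.toNat_of_nonneg h0])
  · rw [if_neg h2]
    have hc : ¬ (0 ≤ x ∧ x.toNat ∈ n.primeFactors) := by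
      rintro ⟨-, hm⟩
      rw [Nat.mem_primeFactors] at hm
      have := hm.1.two_le
      have := Nat.le_of_dvd (by omega) hm.2.1
      omega
    exact ⟨fun hk => Or.inl hk, fun h' => h'.elim id (fun hcond => absurd hcond hc)⟩

theorem lem_getD_pvFactorAddF (f : Nat) : ∀ (n p : Nat) (num : Int) (d : PySem.Dict Int Int),
    n + 1 - p ≤ f → 2 ≤ p → (∀ q, 2 ≤ q → q < p → ¬ q ∣ n) → ∀ x : Int,
    (pvFactorAddF f n p num d).getD x 0 =
      d.getD x 0 + (if 0 ≤ x ∧ x.toNat ∈ n.primeFactors then num else 0) := by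
  induction f with
  | zero =>
    intro n p num d hf hp inv x
    have hlt : n < p * p := lt_of_lt_of_le (by omega) (Nat.le_mul_of_pos_left p (by omega))
    exact lem_terminal_getD n p num d hlt inv x
  | succ f ih =>
    intro n p num d hf hp inv x
    simp only [pvFactorAddF]
    by_cases h : 2 ≤ p ∧ p * p ≤ n
    · rw [if_pos h]
      have hple : p ≤ n := le_trans (Nat.le_mul_of_pos_left p (by omega)) h.2
      by_cases hd : n % p = 0
      · rw [if_pos hd]
        have hn : 0 < n := by omega
        have hpd : p ∣ n := Nat.dvd_of_mod_eq_zero hd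
        have hpp : p.Prime := lem_prime_of_no_small n p h.1 hpd inv
        have inv' : ∀ q, 2 ≤ q → q < p + 1 → ¬ q ∣ pvStrip n p := by
          intro q hq2 hqlt hdq
          rcases Nat.lt_succ_iff_lt_or_eq.mp hqlt with hlt' | rfl
          · exact inv q hq2 hlt' (hdq.trans (pvStrip_dvd n p))
          · exact pvStrip_not_dvd n q hq2 hn hdq
        have hsle : pvStrip n p ≤ n := pvStripF_le n n p
        rw [ih (pvStrip n p) (p + 1) num _ (by omega) (by omega) inv' x,
          PySem.Dict.getD_insert d (p : Int) x _ 0]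
        by_cases hx : x = (p : Int)
        · subst hx
          have h1 : ¬ ((p : Int)).toNat ∈ (pvStrip n p).primeFactors := by
            rw [Nat.mem_primeFactors, Int.toNat_natCast]
            rintro ⟨-, hdd, -⟩
            exact pvStrip_not_dvd n p h.1 hn hdd
          have h2 : ((p : Int)).toNat ∈ n.primeFactors :=
            Int.toNat_natCast p ▸ Nat.mem_primeFactors.mpr ⟨hpp, hpd, by omega⟩
          rw [if_pos rfl, if_neg (fun hx => h1 hx.2), if_pos ⟨Int.natCast_nonneg p, h2⟩, add_zero]
        · rw [if_neg hx]
          have hcond : (0 ≤ x ∧ x.toNat ∈ (pvStrip n p).primeFactors) ↔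
              (0 ≤ x ∧ x.toNat ∈ n.primeFactors) := by
            constructor
            · rintro ⟨h0, hm⟩
              exact ⟨h0, (lem_primeFactors_strip n p hpp hpd hn x.toNat).mpr (Or.inr hm)⟩
            · rintro ⟨h0, hm⟩
              rcases (lem_primeFactors_strip n p hpp hpd hn x.toNat).mp hm with he | hm'
              · exact absurd (by rw [← he, Int.toNat_of_nonneg h0]) hx
              · exact ⟨h0, hm'⟩
          rw [if_congr hcond rfl rfl]
      · rw [if_neg hd]
        have inv' : ∀ q, 2 ≤ q → q < p + 1 → ¬ q ∣ n := by
          intro q hq2 hqlt hdq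
          rcases Nat.lt_succ_iff_lt_or_eq.mp hqlt with hlt' | rfl
          · exact inv q hq2 hlt' hdq
          · exact hd (Nat.mod_eq_zero_of_dvd hdq)
        exact ih n (p + 1) num d (by omega) (by omega) inv' x
    · rw [if_neg h]
      have hlt : n < p * p := by
        rcases Nat.lt_or_ge n (p * p) with h' | h'
        · exact h'
        · exact absurd ⟨hp, h'⟩ h
      exact lem_terminal_getD n p num d hlt inv x

theorem lem_mem_keys_pvFactorAddF (f : Nat) : ∀ (n p : Nat) (num : Int) (d : PySem.Dict Int Int),
    n + 1 - p ≤ f → 2 ≤ p → (∀ q, 2 ≤ q → q < p → ¬ q ∣ n) → ∀ x : Int,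
    (x ∈ (pvFactorAddF f n p num d).keys ↔ x ∈ d.keys ∨ (0 ≤ x ∧ x.toNat ∈ n.primeFactors)) := by
  induction f with
  | zero =>
    intro n p num d hf hp inv x
    have hlt : n < p * p := lt_of_lt_of_le (by omega) (Nat.le_mul_of_pos_left p (by omega))
    exact lem_terminal_keys n p num d hlt inv x
  | succ f ih =>
    intro n p num d hf hp inv x
    simp only [pvFactorAddF]
    by_cases h : 2 ≤ p ∧ p * p ≤ n
    · rw [if_pos h]
      have hple : p ≤ n := le_trans (Nat.le_mul_of_pos_left p (by omega)) h.2
      by_cases hd : n % p = 0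
      · rw [if_pos hd]
        have hn : 0 < n := by omega
        have hpd : p ∣ n := Nat.dvd_of_mod_eq_zero hd
        have hpp : p.Prime := lem_prime_of_no_small n p h.1 hpd inv
        have inv' : ∀ q, 2 ≤ q → q < p + 1 → ¬ q ∣ pvStrip n p := by
          intro q hq2 hqlt hdq
          rcases Nat.lt_succ_iff_lt_or_eq.mp hqlt with hlt' | rfl
          · exact inv q hq2 hlt' (hdq.trans (pvStrip_dvd n p))
          · exact pvStrip_not_dvd n q hq2 hn hdq
        have hsle : pvStrip n p ≤ n := pvStripF_le n n p
        rw [ih (pvStrip n p) (p + 1) num _ (by omega) (by omega) inv' x,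
          PySem.Dict.mem_keys_insert]
        constructor
        · rintro ((rfl | hk) | ⟨h0, hm⟩)
          · exact Or.inr ⟨Int.natCast_nonneg p,
              Int.toNat_natCast p ▸ Nat.mem_primeFactors.mpr ⟨hpp, hpd, by omega⟩⟩
          · exact Or.inl hk
          · exact Or.inr ⟨h0, (lem_primeFactors_strip n p hpp hpd hn x.toNat).mpr (Or.inr hm)⟩
        · rintro (hk | ⟨h0, hm⟩)
          · exact Or.inl (Or.inr hk)
          · rcases (lem_primeFactors_strip n p hpp hpd hn x.toNat).mp hm with he | hm'
            · exact Or.inl (Or.inl (by rw [← he, Int.toNat_of_nonneg h0]))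
            · exact Or.inr ⟨h0, hm'⟩
      · rw [if_neg hd]
        have inv' : ∀ q, 2 ≤ q → q < p + 1 → ¬ q ∣ n := by
          intro q hq2 hqlt hdq
          rcases Nat.lt_succ_iff_lt_or_eq.mp hqlt with hlt' | rfl
          · exact inv q hq2 hlt' hdq
          · exact hd (Nat.mod_eq_zero_of_dvd hdq)
        exact ih n (p + 1) num d (by omega) (by omega) inv' x
    · rw [if_neg h]
      have hlt : n < p * p := by
        rcases Nat.lt_or_ge n (p * p) with h' | h'
        · exact h'
        · exact absurd ⟨hp, h'⟩ h
      exact lem_terminal_keys n p num d hlt inv x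

theorem lem_nodup_keys_pvFactorAddF (f : Nat) : ∀ (n p : Nat) (num : Int) (d : PySem.Dict Int Int),
    d.keys.Nodup → (pvFactorAddF f n p num d).keys.Nodup := by
  induction f with
  | zero =>
    intro n p num d hd
    simp only [pvFactorAddF]
    split
    · exact PySem.Dict.nodup_keys_insert d _ _ hd
    · exact hd
  | succ f ih =>
    intro n p num d hd
    simp only [pvFactorAddF]
    split
    · split
      · exact ih _ _ _ _ (PySem.Dict.nodup_keys_insert d _ _ hd)
      · exact ih _ _ _ _ hd
    · split
      · exact PySem.Dict.nodup_keys_insert d _ _ hd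
      · exact hd

theorem lem_getD_pvFactorAdd (n p : Nat) (num : Int) (d : PySem.Dict Int Int) :
    2 ≤ p → (∀ q, 2 ≤ q → q < p → ¬ q ∣ n) → ∀ x : Int,
    (pvFactorAdd n p num d).getD x 0 =
      d.getD x 0 + (if 0 ≤ x ∧ x.toNat ∈ n.primeFactors then num else 0) :=
  lem_getD_pvFactorAddF (n + 1 - p) n p num d (le_refl _)

theorem lem_mem_keys_pvFactorAdd (n p : Nat) (num : Int) (d : PySem.Dict Int Int) :
    2 ≤ p → (∀ q, 2 ≤ q → q < p → ¬ q ∣ n) → ∀ x : Int,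
    (x ∈ (pvFactorAdd n p num d).keys ↔ x ∈ d.keys ∨ (0 ≤ x ∧ x.toNat ∈ n.primeFactors)) :=
  lem_mem_keys_pvFactorAddF (n + 1 - p) n p num d (le_refl _)

theorem lem_nodup_keys_pvFactorAdd (n p : Nat) (num : Int) (d : PySem.Dict Int Int)
    (hd : d.keys.Nodup) : (pvFactorAdd n p num d).keys.Nodup :=
  lem_nodup_keys_pvFactorAddF (n + 1 - p) n p num d hd

theorem lem_getD_foldB (lst : List Int) (d : PySem.Dict Int Int) (x : Int) :
    (lst.foldl (fun d num => pvFactorAdd num.natAbs 2 num d) d).getD x 0 =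
      d.getD x 0 +
        (lst.map (fun num => if 0 ≤ x ∧ x.toNat ∈ num.natAbs.primeFactors then num else 0)).sum := by
  induction lst generalizing d with
  | nil => simp
  | cons a t ih =>
    simp only [List.foldl_cons, List.map_cons, List.sum_cons]
    rw [ih, lem_getD_pvFactorAdd a.natAbs 2 a d (by omega) (fun q h1 h2 => by omega) x]
    ring

theorem lem_mem_keys_foldB (lst : List Int) (d : PySem.Dict Int Int) (x : Int) :
    x ∈ (lst.foldl (fun d num => pvFactorAdd num.natAbs 2 num d) d).keys ↔
      x ∈ d.keys ∨ ∃ num ∈ lst, 0 ≤ x ∧ x.toNat ∈ num.natAbs.primeFactors := by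
  induction lst generalizing d with
  | nil => simp
  | cons a t ih =>
    simp only [List.foldl_cons, List.mem_cons]
    rw [ih, lem_mem_keys_pvFactorAdd a.natAbs 2 a d (by omega) (fun q h1 h2 => by omega) x]
    constructor
    · rintro ((hk | hc) | ⟨num, hnum, hc⟩)
      · exact Or.inl hk
      · exact Or.inr ⟨a, Or.inl rfl, hc⟩
      · exact Or.inr ⟨num, Or.inr hnum, hc⟩
    · rintro (hk | ⟨num, (rfl | hnum), hc⟩)
      · exact Or.inl (Or.inl hk)
      · exact Or.inl (Or.inr hc)
      · exact Or.inr ⟨num, hnum, hc⟩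

theorem lem_nodup_keys_foldB (lst : List Int) (d : PySem.Dict Int Int) (hd : d.keys.Nodup) :
    (lst.foldl (fun d num => pvFactorAdd num.natAbs 2 num d) d).keys.Nodup := by
  induction lst generalizing d with
  | nil => exact hd
  | cons a t ih => exact ih _ (lem_nodup_keys_pvFactorAdd a.natAbs 2 a d hd)

theorem lem_foldl_append {α β : Type} (l : List α) (f : α → β) (init : List β) :
    l.foldl (fun acc x => acc ++ [f x]) init = init ++ l.map f := by
  induction l generalizing init with
  | nil => simp
  | cons a t ih => simp [ih]

theorem lem_values_foldA (s : List Int) (d : PySem.Dict Int (PySem.Set Int))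
    (hnd : s.Nodup) (hc : ∀ a ∈ s, d.contains a = false) :
    (s.foldl (fun d num => d.insert num (pvPFactors num)) d).values
      = d.values ++ s.map pvPFactors := by
  induction s generalizing d with
  | nil => simp
  | cons a t ih =>
    simp only [List.foldl_cons, List.map_cons]
    rw [ih _ (List.nodup_cons.mp hnd).2]
    · have hins : (d.insert a (pvPFactors a)).items = d.items ++ [(a, pvPFactors a)] :=
        PySem.Dict.items_insert_of_not_contains d (pvPFactors a) (hc a (List.mem_cons_self))
      simp only [PySem.Dict.values, hins, List.map_append, List.map_cons, List.map_nil]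
      simp
    · intro b hb
      rw [PySem.Dict.contains_insert]
      have hba : (b == a) = false := by
        simp only [beq_eq_false_iff_ne, ne_eq]
        intro hba
        exact (List.nodup_cons.mp hnd).1 (hba ▸ hb)
      rw [hba, hc b (List.mem_cons_of_mem a hb)]
      simp

theorem lem_sum_foldl (l : List Int) (P : Int → Prop) [DecidablePred P] (a : Int) :
    l.foldl (fun acc num => if P num then acc + num else acc) a =
      a + (l.map (fun num => if P num then num else 0)).sum := by
  induction l generalizing a with
  | nil => simp
  | cons b t ih =>
    simp only [List.foldl_cons, List.map_cons, List.sum_cons, ih]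
    by_cases hb : P b <;> simp [hb] <;> ring

theorem lem_mem_pvPFactors (num x : Int) :
    x ∈ pvPFactors num ↔ ∃ q : Nat, x = (q : Int) ∧ q ∈ num.natAbs.primeFactors := by
  unfold pvPFactors
  rw [PySem.Set.mem_ofList, lem_mem_pvFactorWhile]
  simp

-- ===== VERDICT (by name: the statement is the Claim_ definition above) =====
theorem sum_for_list_spec : Claim_equal_sum_for_list := by
  intro lst hdom hpre
  unfold Spec_sum_for_list sum_for_list sum_for_list_alt
  simp only []
  -- A's dict values: one set of prime factors per distinct element
  have hvals : ((PySem.Set.ofList lst).foldl (fun d num => d.insert num (pvPFactors num))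
        PySem.Dict.empty).values = (PySem.Set.ofList lst).map pvPFactors := by
    rw [lem_values_foldA (PySem.Set.ofList lst) PySem.Dict.empty (PySem.Set.nodup_ofList lst)
      (fun a _ => PySem.Dict.contains_empty a)]
    simp [PySem.Dict.values, PySem.Dict.empty]
  rw [hvals]
  -- the deduplicated list is nonempty
  obtain ⟨b, t0, hlst⟩ : ∃ b t0, lst = b :: t0 := by
    cases lst with
    | nil => exact absurd rfl hpre
    | cons b t0 => exact ⟨b, t0, rfl⟩
  obtain ⟨a, t, hS⟩ : ∃ a t, PySem.Set.ofList lst = a :: t := by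
    have hb : b ∈ PySem.Set.ofList lst := (PySem.Set.mem_ofList ..).mpr (hlst ▸ List.mem_cons_self)
    cases hSS : PySem.Set.ofList lst with
    | nil => rw [hSS] at hb; exact absurd hb (List.not_mem_nil)
    | cons a t => exact ⟨a, t, rfl⟩
  rw [hS]
  simp only [List.map_cons]
  -- B's dict
  have hkeysB : ∀ x : Int, x ∈ (lst.foldl (fun d num => pvFactorAdd num.natAbs 2 num d)
      PySem.Dict.empty).keys ↔ ∃ num ∈ lst, 0 ≤ x ∧ x.toNat ∈ num.natAbs.primeFactors := by
    intro x
    rw [lem_mem_keys_foldB lst PySem.Dict.empty x]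
    simp [PySem.Dict.keys_empty]
  have hgetB : ∀ x : Int, (lst.foldl (fun d num => pvFactorAdd num.natAbs 2 num d)
      PySem.Dict.empty).getD x 0 =
      (lst.map (fun num => if 0 ≤ x ∧ x.toNat ∈ num.natAbs.primeFactors then num else 0)).sum := by
    intro x
    rw [lem_getD_foldB lst PySem.Dict.empty x]
    simp
  -- the two sorted key lists coincide
  have hmemTF : ∀ x : Int, x ∈ (t.map pvPFactors).foldl (fun a b => PySem.Set.union a b)
      (pvPFactors a) ↔ ∃ num ∈ lst, 0 ≤ x ∧ x.toNat ∈ num.natAbs.primeFactors := by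
    intro x
    rw [lem_mem_foldl_union]
    constructor
    · rintro (hx | ⟨s', hs', hx⟩)
      · obtain ⟨q, rfl, hq⟩ := (lem_mem_pvPFactors a x).mp hx
        exact ⟨a, (PySem.Set.mem_ofList ..).mp (hS ▸ List.mem_cons_self),
          Int.natCast_nonneg q, by rw [Int.toNat_natCast]; exact hq⟩
      · obtain ⟨num, hnum, rfl⟩ := List.mem_map.mp hs'
        obtain ⟨q, rfl, hq⟩ := (lem_mem_pvPFactors num x).mp hx
        exact ⟨num, (PySem.Set.mem_ofList ..).mp (hS ▸ List.mem_cons_of_mem a hnum),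
          Int.natCast_nonneg q, by rw [Int.toNat_natCast]; exact hq⟩
    · rintro ⟨num, hnum, h0, hm⟩
      have hmem : x ∈ pvPFactors num :=
        (lem_mem_pvPFactors num x).mpr ⟨x.toNat, (Int.toNat_of_nonneg h0).symm, hm⟩
      have hnum' : num ∈ (a :: t : List Int) := hS ▸ (PySem.Set.mem_ofList ..).mpr hnum
      rcases List.mem_cons.mp hnum' with rfl | hnum''
      · exact Or.inl hmem
      · exact Or.inr ⟨pvPFactors num, List.mem_map_of_mem hnum'', hmem⟩
  have hndTF : ((t.map pvPFactors).foldl (fun a b => PySem.Set.union a b) (pvPFactors a)).Nodup :=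
    lem_nodup_foldl_union _ _ (PySem.Set.nodup_ofList _)
  have hndB : (lst.foldl (fun d num => pvFactorAdd num.natAbs 2 num d)
      PySem.Dict.empty).keys.Nodup :=
    lem_nodup_keys_foldB lst PySem.Dict.empty (by simp [PySem.Dict.keys_empty])
  have hperm : ((t.map pvPFactors).foldl (fun a b => PySem.Set.union a b) (pvPFactors a)).Perm
      (lst.foldl (fun d num => pvFactorAdd num.natAbs 2 num d) PySem.Dict.empty).keys :=
    (List.perm_ext_iff_of_nodup hndTF hndB).mpr (fun x => by rw [hmemTF, hkeysB])
  have hsorted := PySem.List.sorted_eq_sorted_of_perm _ _ (fun x : Int => x)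
    (fun u v huv => huv) hperm
  rw [lem_foldl_append, hsorted, List.nil_append]
  -- pointwise equality of the rows
  apply List.map_congr_left
  intro p hp
  have hpk : p ∈ (lst.foldl (fun d num => pvFactorAdd num.natAbs 2 num d)
      PySem.Dict.empty).keys := ((PySem.List.mem_sorted ..).mp hp)
  obtain ⟨num0, hnum0, h0, hm0⟩ := (hkeysB p).mp hpk
  have hq : p.toNat.Prime := (Nat.mem_primeFactors.mp hm0).1
  rw [lem_sum_foldl lst (fun num => PySem.Int.mod num p = 0) 0, zero_add, hgetB p]
  have hnum : ∀ num : Int, (if PySem.Int.mod num p = 0 then num else 0)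
      = (if 0 ≤ p ∧ p.toNat ∈ num.natAbs.primeFactors then num else 0) := by
    intro num
    by_cases hz : num = 0
    · subst hz
      rw [if_pos (by rw [PySem.Int.mod_eq_zero_iff_dvd]; exact dvd_zero p)]
      by_cases hc : 0 ≤ p ∧ p.toNat ∈ (0 : Int).natAbs.primeFactors
      · rw [if_pos hc]
      · rw [if_neg hc]
    · have hne : num.natAbs ≠ 0 := Int.natAbs_ne_zero.mpr hz
      have hiff : PySem.Int.mod num p = 0 ↔ (0 ≤ p ∧ p.toNat ∈ num.natAbs.primeFactors) := by
        rw [PySem.Int.mod_eq_zero_iff_dvd]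
        constructor
        · intro hd
          refine ⟨h0, Nat.mem_primeFactors.mpr ⟨hq, ?_, hne⟩⟩
          rw [← Int.natCast_dvd, Int.toNat_of_nonneg h0]
          exact hd
        · rintro ⟨-, hm⟩
          have hd := Int.natCast_dvd.mpr (Nat.mem_primeFactors.mp hm).2.1
          rwa [Int.toNat_of_nonneg h0] at hd
      rw [if_congr hiff rfl rfl]
  rw [List.map_congr_left (fun num _ => hnum num)]
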